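-- pv_equiv track=rewrite | github.com/MisterMackey/AoC | day14/solution.py | max_dims
-- ===== SOURCE A (Python) =====
-- def max_dims(tuple_dims):
--     xmin = [c[0] for c in tuple_dims]
--     xmax = [c[1] for c in tuple_dims]
--     ymin = [c[2] for c in tuple_dims]
--     ymax = [c[3] for c in tuple_dims]
--     left = min(xmin)
--     right = max(xmax)
--     top = min(ymin)
--     bottom = max(ymax)
--     return left,right, 0,bottom #0 hardcoded
-- ===== SOURCE B (Python) =====
-- def max_dims(tuple_dims):
--     left, right, _, bottom = tuple_dims[0]
--     for l, r, _, b in tuple_dims[1:]: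
--         if l < left:
--             left = l
--         if r > right:
--             right = r
--         if b > bottom:
--             bottom = b
--     return left, right, 0, bottom
-- ===== Notes on version B (the rewrite author's own statement) =====
-- stated objective: simpler
-- what changed: Replaced the four intermediate list comprehensions plus min/max calls with a single loop over the tuples maintaining running left/right/bottom accumulators.
-- outside the precondition, e.g. on max_dims([]): A raises ValueError, B raises IndexError
import Mathlib
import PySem

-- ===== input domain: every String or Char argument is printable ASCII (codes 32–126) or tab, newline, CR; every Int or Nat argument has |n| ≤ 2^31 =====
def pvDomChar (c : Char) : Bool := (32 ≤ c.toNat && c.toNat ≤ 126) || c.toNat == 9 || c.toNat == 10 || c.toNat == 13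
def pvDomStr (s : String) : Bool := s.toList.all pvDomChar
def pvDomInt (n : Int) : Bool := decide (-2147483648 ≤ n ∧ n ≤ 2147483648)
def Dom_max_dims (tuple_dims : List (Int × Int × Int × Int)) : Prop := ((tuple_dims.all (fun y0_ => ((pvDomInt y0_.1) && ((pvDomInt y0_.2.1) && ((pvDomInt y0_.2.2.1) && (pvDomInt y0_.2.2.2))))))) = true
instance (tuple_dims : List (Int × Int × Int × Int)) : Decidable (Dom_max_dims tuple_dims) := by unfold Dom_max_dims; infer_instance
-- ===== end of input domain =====

-- ===== PORT A =====
def max_dims (tuple_dims : List (Int × Int × Int × Int)) : Int × Int × Int × Int :=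
  let xmin := tuple_dims.map (fun c => c.1)
  let xmax := tuple_dims.map (fun c => c.2.1)
  let ymin := tuple_dims.map (fun c => c.2.2.1)
  let ymax := tuple_dims.map (fun c => c.2.2.2)
  match PySem.List.min? xmin (fun x => x), PySem.List.max? xmax (fun x => x),
        PySem.List.min? ymin (fun x => x), PySem.List.max? ymax (fun x => x) with
  | some left, some right, some _top, some bottom => (left, right, 0, bottom)
  | _, _, _, _ => (0, 0, 0, 0)  -- Python raises ValueError on empty input; excluded by Pre_

-- ===== PORT B =====
def max_dims_alt (tuple_dims : List (Int × Int × Int × Int)) : Int × Int × Int × Int :=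
  match tuple_dims with
  | [] => (0, 0, 0, 0)  -- Source B raises IndexError on tuple_dims[0]; excluded by Pre_
  | c :: rest =>
    let s := rest.foldl
      (fun (acc : Int × Int × Int) d =>
        (if d.1 < acc.1 then d.1 else acc.1,
         if acc.2.1 < d.2.1 then d.2.1 else acc.2.1,
         if acc.2.2 < d.2.2.2 then d.2.2.2 else acc.2.2))
      (c.1, c.2.1, c.2.2.2)
    (s.1, s.2.1, 0, s.2.2)

-- ===== PRECONDITION & SPEC =====
-- Python's min()/max() raise ValueError on an empty sequence, so A only returns on nonempty input.
def Pre_max_dims (tuple_dims : List (Int × Int × Int × Int)) : Prop := tuple_dims ≠ []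
instance (tuple_dims : List (Int × Int × Int × Int)) : Decidable (Pre_max_dims tuple_dims) := by unfold Pre_max_dims; infer_instance
def pvWitness_max_dims : (List (Int × Int × Int × Int)) := [(1, 5, 2, 7), (0, 3, -1, 9)]
def Spec_max_dims (tuple_dims : List (Int × Int × Int × Int)) (out : Int × Int × Int × Int) : Prop := out = max_dims_alt tuple_dims
instance (tuple_dims : List (Int × Int × Int × Int)) (out : Int × Int × Int × Int) : Decidable (Spec_max_dims tuple_dims out) := by unfold Spec_max_dims; infer_instance

-- ===== CLAIM (what is proved, stated in full; the proofs are below) =====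
def Claim_equal_max_dims : Prop := ∀ (tuple_dims : List (Int × Int × Int × Int)), Dom_max_dims tuple_dims → Pre_max_dims tuple_dims → Spec_max_dims tuple_dims (max_dims tuple_dims)

-- ===== LEMMAS AND PROOFS =====

theorem tri_fold (rest : List (Int × Int × Int × Int)) (a b d : Int) :
    rest.foldl
      (fun (acc : Int × Int × Int) e =>
        (if e.1 < acc.1 then e.1 else acc.1,
         if acc.2.1 < e.2.1 then e.2.1 else acc.2.1,
         if acc.2.2 < e.2.2.2 then e.2.2.2 else acc.2.2))
      (a, b, d)
    = ((rest.map (fun c => c.1)).foldl min a,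
       (rest.map (fun c => c.2.1)).foldl max b,
       (rest.map (fun c => c.2.2.2)).foldl max d) := by
  induction rest generalizing a b d with
  | nil => rfl
  | cons e t ih =>
    simp only [List.foldl, List.map]
    have h1 : (if e.1 < a then e.1 else a) = min a e.1 := by omega
    have h2 : (if b < e.2.1 then e.2.1 else b) = max b e.2.1 := by omega
    have h3 : (if d < e.2.2.2 then e.2.2.2 else d) = max d e.2.2.2 := by omega
    rw [h1, h2, h3, ih]

-- ===== VERDICT (by name: the statement is the Claim_ definition above) =====
theorem max_dims_spec : Claim_equal_max_dims := by
  intro tuple_dims _hdom hpre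
  unfold Spec_max_dims
  match tuple_dims, hpre with
  | c :: rest, _ =>
    show max_dims (c :: rest) = max_dims_alt (c :: rest)
    simp only [max_dims, max_dims_alt, List.map, PySem.List.min?_id_cons, PySem.List.max?_id_cons,
      tri_fold]
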